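/- GENERATED by mk_final_copies.py from the proof of the farm's unit `codebook_decode` (farm:codebook_decode.1: Proof.lean) as the
   re-elaboration sweep compiled it — do not edit. -/
import Asan.CheckWalk
import Vorbis.Spec.Units.codebook_decode
import Vorbis.Spec.Worked.codebook_decode_Lemmas

open X86 X86.User Asan Vorbis Vorbis.Spec Vorbis.Spec.codebook_decode

set_option maxRecDepth 4000
set_option maxHeartbeats 4000000

/-- `codebook_decode(f, c, output, len)` satisfies its contract. The pushes and the call of codebook_decode_start (its precondition:
`pre_start`); after the return (cut 1, 0x10e7bd) the stack slots, the two fields `dimensions` / `multiplicands` of the book, the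
footprint and the reader's clauses are restated for the returned state; one walk through `len' = min(len, dimensions)`,
`z *= dimensions` and the `sequence_p` test to the two loop heads (cuts 2 and 3; `z < 0`: to the `ret`); each loop head is
reached on two paths (`len ≤ dimensions` or not) and handed to `loop_seq_ok` / `loop_plain_ok` of Lemmas.lean with the invariant from `at_loop_entry`. -/
theorem Vorbis.Spec.Worked.codebook_decode_ok : Vorbis.Spec.codebook_decode.Statement := by
  intro Lay hLay μ hμ u₀ hcode h_start hload4 hload1 hload8 others frames Blk len u ret he hpre
  v_entry he
  obtain ⟨hbook, hwin⟩ := hpre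
  have hstart := h_start others frames Blk len
  have hsh : ShadowPre others frames u := hbook.reader.shadow
  have hsp := hsh.rsp
  have hwf := hbook.reader.where_obj
  have hwc := book_where hbook (by omega)
  -- the struct at `c` does not meet `*f` (used by the frame tactics: the fields of the book over the callee's footprint)
  have hap := hbook.apart.book
  simp only [vblock, voff] at hap
  -- `len'`, and where the window of floats is
  obtain ⟨n, hn⟩ : ∃ n, decodeLen u.mem (u.reg .rsi).toNat (argInt (u.reg .rcx)) = n := ⟨_, rfl⟩
  rw [hn] at hwin
  -- 0x10e7a0 … 0x10e7b8: the pushes, the spill of `output`, the call of codebook_decode_start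
  u_walk hcode [hμ.vendor] span [Vorbis.L.textLo, Vorbis.L.textHi] side (v_side)
  case call_inv => v_inv
  case pre_10e7b8 =>
    have hsame0 : Mem.SameExcept [⟨(u.reg .rsp).toNat - 80, (u.reg .rsp).toNat⟩] u.mem s_10e7b8.mem := by
      u_same
    have hun0 : ShadowUntouched u.mem s_10e7b8.mem := by v_untouched
    have hrsp0 : (s_10e7b8.reg .rsp).toNat = (u.reg .rsp).toNat - 80 := by
      rw [w_rsp]
      u_omega
    exact (pre_start hbook he_room (w_kept.get .rdi rfl) (w_kept.get .rsi rfl) hrsp0 hsame0 hun0).1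
  -- 0x10e7bd (cut 1): after the return of codebook_decode_start
  have hsame0 : Mem.SameExcept [⟨(u.reg .rsp).toNat - 80, (u.reg .rsp).toNat⟩] u.mem s_10e7b8.mem := by
    u_same
  have hun0 : ShadowUntouched u.mem s_10e7b8.mem := by v_untouched
  have c_rdi : s_10e7b8.reg .rdi = u.reg .rdi := w_kept_10e7b8.get .rdi rfl
  have c_rsi : s_10e7b8.reg .rsi = u.reg .rsi := w_kept_10e7b8.get .rsi rfl
  have hrsp0 : (s_10e7b8.reg .rsp).toNat = (u.reg .rsp).toNat - 80 := by
    rw [w_rsp_10e7b8]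
    u_omega
  -- the fields of the book and μ read the same at the callee's entry (its post speaks of that memory)
  obtain ⟨_, hsf1, hmu1⟩ := pre_start hbook he_room c_rdi c_rsi hrsp0 hsame0 hun0
  -- the stack slots at the callee's entry
  have hp0 : UInt64.ofNat (s_10e7b8.mem.readLE (u.reg .rsp) 8) = ret := by u_resolve
  have hp1 : UInt64.ofNat (s_10e7b8.mem.readLE (u.reg .rsp - 8) 8) = u.reg .r15 := by u_resolve
  have hp2 : UInt64.ofNat (s_10e7b8.mem.readLE (u.reg .rsp - 16) 8) = u.reg .r14 := by u_resolve
  have hp3 : UInt64.ofNat (s_10e7b8.mem.readLE (u.reg .rsp - 24) 8) = u.reg .r13 := by u_resolve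
  have hp4 : UInt64.ofNat (s_10e7b8.mem.readLE (u.reg .rsp - 32) 8) = u.reg .r12 := by u_resolve
  have hp5 : UInt64.ofNat (s_10e7b8.mem.readLE (u.reg .rsp - 40) 8) = u.reg .rbp := by u_resolve
  have hp6 : UInt64.ofNat (s_10e7b8.mem.readLE (u.reg .rsp - 48) 8) = u.reg .rbx := by u_resolve
  have hpout : UInt64.ofNat (s_10e7b8.mem.readLE (u.reg .rsp - 72) 8) = u.reg .rdx := by u_resolve
  obtain ⟨hunP, hrpP, hhi, hres⟩ := w_post
  rw [c_rdi] at hrpP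
  rw [c_rsi, hsf1.N, hsf1.lookup_type] at hres
  -- (what `v_after_call` does, in two steps: the stack slots are carried over from the callee's entry memory first)
  have w_eq := Vorbis.conv_code_eqOn w_code
  have w_df := (show X86.User.abiInv _ from w_inv).1
  have w_mx := (show X86.User.abiInv _ from w_inv).2
  have w_sse := Vorbis.sseOK_of_abiInv w_inv
  simp only [X86.User.Spec.footprint, vspec, w_rsp_10e7b8, c_rdi] at w_same
  have hs0 : UInt64.ofNat (s_10e7b8r.mem.readLE (u.reg .rsp) 8) = ret := by u_frame hp0
  have hs1 : UInt64.ofNat (s_10e7b8r.mem.readLE (u.reg .rsp - 8) 8) = u.reg .r15 := by u_frame hp1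
  have hs2 : UInt64.ofNat (s_10e7b8r.mem.readLE (u.reg .rsp - 16) 8) = u.reg .r14 := by u_frame hp2
  have hs3 : UInt64.ofNat (s_10e7b8r.mem.readLE (u.reg .rsp - 24) 8) = u.reg .r13 := by u_frame hp3
  have hs4 : UInt64.ofNat (s_10e7b8r.mem.readLE (u.reg .rsp - 32) 8) = u.reg .r12 := by u_frame hp4
  have hs5 : UInt64.ofNat (s_10e7b8r.mem.readLE (u.reg .rsp - 40) 8) = u.reg .rbp := by u_frame hp5
  have hs6 : UInt64.ofNat (s_10e7b8r.mem.readLE (u.reg .rsp - 48) 8) = u.reg .rbx := by u_frame hp6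
  have hsout : UInt64.ofNat (s_10e7b8r.mem.readLE (u.reg .rsp - 72) 8) = u.reg .rdx := by u_frame hpout
  rw [w_mem_10e7b8] at w_same
  -- the fields of the book the code reads, as numbers: `dimensions` (D) and `multiplicands` (mp)
  obtain ⟨D, hDdef⟩ : ∃ D, u.mem.u32 ((u.reg .rsi).toNat + 0) = D := ⟨_, rfl⟩
  have hDlt : D < 2 ^ 32 := by
    rw [← hDdef]
    exact u.mem.u32_lt _
  have hdim : Codebook.dimensions u.mem (u.reg .rsi).toNat = sint32 D := by
    rw [← hDdef]
    rfl
  have hD0 : u.mem.readLE (u.reg .rsi) 4 = D := by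
    rw [← hDdef]
    unfold Mem.u32
    rw [Nat.add_zero, addr_toNat]
  have hD1 : 1 ≤ D ∧ D ≤ 65535 ∧ sint32 D = (D : Int) := by
    have h1 := hbook.cb.K1.dim_pos
    have h2 := hbook.cb.K1.dim_le
    rw [hdim] at h1 h2
    have hc := sint32_cases D
    omega
  have hdn : (Codebook.dimensions u.mem (u.reg .rsi).toNat).toNat = D := by
    rw [hdim]
    omega
  have hn' : (min (argInt (u.reg .rcx)) (sint32 D)).toNat = n := by
    rw [← hdim]
    exact hn
  have hnD : n ≤ D := by
    rw [hD1.2.2] at hn'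
    omega
  obtain ⟨mp, hmp⟩ : ∃ mp, Codebook.multiplicands u.mem (u.reg .rsi).toNat = mp := ⟨_, rfl⟩
  have hM0 : u.mem.readLE (u.reg .rsi + 32) 8 = mp := by
    rw [← hmp]
    exact readLE_field u.mem (u.reg .rsi) 32 8
  -- … in the memory after the call: the callee wrote inside `*f` and below our frame only
  have hD : s_10e7b8r.mem.readLE (u.reg .rsi) 4 = D := by u_frame hD0
  have hM : s_10e7b8r.mem.readLE (u.reg .rsi + 32) 8 = mp := by u_frame hM0
  -- the footprint, the shadow and the reader's clauses so far
  have hsameR : Mem.SameExcept [⟨(u.reg .rsp).toNat - 512, (u.reg .rsp).toNat⟩,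
      ⟨(u.reg .rdi).toNat + 48, (u.reg .rdi).toNat + 56⟩, ⟨(u.reg .rdi).toNat + 84, (u.reg .rdi).toNat + 96⟩,
      ⟨(u.reg .rdi).toNat + 136, (u.reg .rdi).toNat + 144⟩, ⟨(u.reg .rdi).toNat + 1484, (u.reg .rdi).toNat + 1749⟩,
      ⟨(u.reg .rdi).toNat + 1752, (u.reg .rdi).toNat + 1784⟩,
      ⟨(u.reg .rdx).toNat, (u.reg .rdx).toNat + 4 * n⟩] u.mem s_10e7b8r.mem := by
    u_same
  have hunR : ShadowUntouched u.mem s_10e7b8r.mem := Mem.EqOn.trans hun0 hunP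
  have hrpR : ReaderPost Blk len u.mem s_10e7b8r.mem (u.reg .rdi).toNat := by
    refine ⟨hrpP.bits, ?_⟩
    rw [← hmu1]
    exact hrpP.mu_le
  obtain ⟨zr, w_rax⟩ : ∃ z, s_10e7b8r.reg .rax = z := ⟨_, rfl⟩
  rw [w_rax] at hhi hres
  -- what a non-negative result of codebook_decode_start gives (K6): `z·d`, the table `multiplicands[z·d .. z·d + d)`
  have hL := hbook.reader.env.live
  have hgood : (Word.part .w32 zr).msb = false →
      ∃ zd, zd + D ≤ 0x20000000 ∧ (Word.ofBV (BitVec.ofNat 32 D * Word.part .w32 zr)).toNat = zd ∧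
        ∀ i, i < D → Site (Live (stackObjs frames ++ others)) (mp + 4 * (zd + i)) 4 := by
    intro hm
    have hz31 := lt_of_msb zr hhi hm
    have hzv := argInt_of_lt zr hz31
    rw [hzv] at hres
    obtain ⟨hz0, hzN, hty⟩ := hres.resolve_left (by omega)
    have hidx := hbook.cb.multiplicands_index_lt hty zr.toNat (D - 1) hzN (by rw [hdim]; omega)
    rw [hdn] at hidx
    refine ⟨zr.toNat * D, by omega, r15_toNat D zr hDlt hhi (by omega), ?_⟩
    intro i hi
    refine hbook.cb.site_multiplicands hL hty zr.toNat i hzN (by rw [hdim]; omega) ?_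
    unfold Codebook.multiplicands_at
    rw [hmp, hdn]
  obtain ⟨B, hB, hin⟩ := hbook.book
  have hunE : Mem.EqOn 0xC00000 0xE00000 u.mem s_10e7b8r.mem := hunR
  -- 0x10e7bd … the loop heads 0x10e867 / 0x10e8e5 (or, `z < 0`, the `ret`)
  u_walk hcode [hμ.vendor] until [Vorbis.L.codebook_decode.loop1, Vorbis.L.codebook_decode.loop2] span [Vorbis.L.textLo, Vorbis.L.textHi] side (v_side)
  case check_10e7ca =>
    -- 0x10e7ca load4 c+0 (dimensions)
    have hun' : ShadowUntouched u.mem s_10e7ca.mem := by v_untouched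
    refine check_site hsh.inv hun' (Codebook.site_field hL hB hin 0 4 (by decide) (by decide) rfl) ?_
    u_omega
  case check_10e7e3 =>
    -- 0x10e7e3 load1 c+0x1a (sequence_p), `len ≤ dimensions`
    have hun' : ShadowUntouched u.mem s_10e7e3.mem := by v_untouched
    refine check_site hsh.inv hun' (Codebook.site_field hL hB hin 26 1 (by decide) (by decide) rfl) ?_
    u_omega
  case check_10e7e3 =>
    -- 0x10e7e3 load1 c+0x1a (sequence_p), `len > dimensions`
    have hun' : ShadowUntouched u.mem s_10e7e3.mem := by v_untouched
    refine check_site hsh.inv hun' (Codebook.site_field hL hB hin 26 1 (by decide) (by decide) rfl) ?_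
    u_omega
  · -- `z < 0`: 0x10e8f1 `return FALSE`, walked to the `ret`; nothing was written after the call
    refine ReachVia.done ?_
    v_returned
    · refine ⟨?_, ?_, ?_⟩
      · rw [w_mem]
        exact hunR
      · rw [w_mem]
        exact hrpR
      · left
        rw [w_rax]
        rfl
  · -- `sequence_p ≠ 0`, `len ≤ dimensions`: the loop 0x10e867 (cut 2)
    obtain ⟨zd, hidx, hR15, hmult⟩ := hgood hbr_10e7bf
    obtain ⟨hsameS, hunS, hrpS, ht0, ht1, ht2, ht3, ht4, ht5, ht6, htout, hMS⟩ :=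
      at_loop_entry he_room he_top hbook n mp hwin s_10e7b8r s_10e88c _ w_mem hsameR hunR hrpR hs0 hs1 hs2 hs3 hs4 hs5 hs6 hsout hM
    have hL14 := len_keep (u.reg .rcx) D n (by omega) hn' hbr_10e7d6
    have hdfS : s_10e88c.flags .df = false := by
      rw [w_flags]
      simp only [X86.User.df_setStatus]
      exact w_df_10e7e3
    have hmxS : s_10e88c.mxcsr &&& 0x1F80 = 0x1F80 := by
      rw [w_mxcsr]
      exact w_mx
    exact loop_seq_ok hLay hμ hcode hload4 hload8 he_ret_lt he_align he_room he_top he_stack hbook n D mp zd hn hwin hnD hD1.1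
      hmult hidx _ _ hL14 hR15 s_10e88c 0 _ w_rip w_r12 (Nat.zero_le _) (by decide) w_r13 w_r14 w_r15 w_rbp w_rsp
      (w_kept.mono_all (by rfl)) w_eq hsameS hunS hrpS ht0 ht1 ht2 ht3 ht4 ht5 ht6 htout hMS hdfS hmxS
  · -- `sequence_p = 0`, `len ≤ dimensions`: the loop 0x10e8e5 (cut 3)
    obtain ⟨zd, hidx, hR15, hmult⟩ := hgood hbr_10e7bf
    obtain ⟨hsameS, hunS, hrpS, ht0, ht1, ht2, ht3, ht4, ht5, ht6, htout, hMS⟩ :=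
      at_loop_entry he_room he_top hbook n mp hwin s_10e7b8r s_10e7f8 _ w_mem hsameR hunR hrpR hs0 hs1 hs2 hs3 hs4 hs5 hs6 hsout hM
    have hL14 := len_keep (u.reg .rcx) D n (by omega) hn' hbr_10e7d6
    have hdfS : s_10e7f8.flags .df = false := by
      rw [w_flags]
      simp only [X86.User.df_setStatus]
      exact w_df_10e7e3
    have hmxS : s_10e7f8.mxcsr &&& 0x1F80 = 0x1F80 := by
      rw [w_mxcsr]
      exact w_mx
    exact loop_plain_ok hLay hμ hcode hload4 hload8 he_ret_lt he_align he_room he_top he_stack hbook n D mp zd hn hwin hnD hD1.1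
      hmult hidx _ _ hL14 hR15 s_10e7f8 0 _ w_rip w_r12 (Nat.zero_le _) (by decide) rfl w_r14 w_r15 w_rbp w_rsp
      (w_kept.mono_all (by rfl)) w_eq hsameS hunS hrpS ht0 ht1 ht2 ht3 ht4 ht5 ht6 htout hMS hdfS hmxS
  · -- `sequence_p ≠ 0`, `len > dimensions` (r14d := dimensions): the loop 0x10e867 (cut 2)
    obtain ⟨zd, hidx, hR15, hmult⟩ := hgood hbr_10e7bf
    obtain ⟨hsameS, hunS, hrpS, ht0, ht1, ht2, ht3, ht4, ht5, ht6, htout, hMS⟩ :=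
      at_loop_entry he_room he_top hbook n mp hwin s_10e7b8r s_10e88c _ w_mem hsameR hunR hrpR hs0 hs1 hs2 hs3 hs4 hs5 hs6 hsout hM
    have hL14 := len_clamp (u.reg .rcx) D n (by omega) hn' hbr_10e7d6
    have hdfS : s_10e88c.flags .df = false := by
      rw [w_flags]
      simp only [X86.User.df_setStatus]
      exact w_df_10e7e3
    have hmxS : s_10e88c.mxcsr &&& 0x1F80 = 0x1F80 := by
      rw [w_mxcsr]
      exact w_mx
    exact loop_seq_ok hLay hμ hcode hload4 hload8 he_ret_lt he_align he_room he_top he_stack hbook n D mp zd hn hwin hnD hD1.1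
      hmult hidx _ _ hL14 hR15 s_10e88c 0 _ w_rip w_r12 (Nat.zero_le _) (by decide) w_r13 w_r14 w_r15 w_rbp w_rsp
      (w_kept.mono_all (by rfl)) w_eq hsameS hunS hrpS ht0 ht1 ht2 ht3 ht4 ht5 ht6 htout hMS hdfS hmxS
  · -- `sequence_p = 0`, `len > dimensions` (r14d := dimensions): the loop 0x10e8e5 (cut 3)
    obtain ⟨zd, hidx, hR15, hmult⟩ := hgood hbr_10e7bf
    obtain ⟨hsameS, hunS, hrpS, ht0, ht1, ht2, ht3, ht4, ht5, ht6, htout, hMS⟩ :=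
      at_loop_entry he_room he_top hbook n mp hwin s_10e7b8r s_10e7f8 _ w_mem hsameR hunR hrpR hs0 hs1 hs2 hs3 hs4 hs5 hs6 hsout hM
    have hL14 := len_clamp (u.reg .rcx) D n (by omega) hn' hbr_10e7d6
    have hdfS : s_10e7f8.flags .df = false := by
      rw [w_flags]
      simp only [X86.User.df_setStatus]
      exact w_df_10e7e3
    have hmxS : s_10e7f8.mxcsr &&& 0x1F80 = 0x1F80 := by
      rw [w_mxcsr]
      exact w_mx
    exact loop_plain_ok hLay hμ hcode hload4 hload8 he_ret_lt he_align he_room he_top he_stack hbook n D mp zd hn hwin hnD hD1.1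
      hmult hidx _ _ hL14 hR15 s_10e7f8 0 _ w_rip w_r12 (Nat.zero_le _) (by decide) rfl w_r14 w_r15 w_rbp w_rsp
      (w_kept.mono_all (by rfl)) w_eq hsameS hunS hrpS ht0 ht1 ht2 ht3 ht4 ht5 ht6 htout hMS hdfS hmxS
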